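-- pv_equiv track=rewrite | github.com/dburian/transformer_document_embedding | notebooks/wiki_sims.nb.py | get_found_count
-- ===== SOURCE A (Python) =====
-- def get_found_count(text: str, to_find: list[str]) -> int:
--     count = 0
--     start = 0
--     inds = [text.find(word) for word in to_find]
--     while max(inds) > -1:
--         count += 1
--         start = min((ind for ind in inds if ind > -1))
--         inds = [text.find(word, start + 1) for word in to_find]
--
--     return count
-- ===== SOURCE B (Python) =====
-- def get_found_count(text: str, to_find: list[str]) -> int:
--     # One left-to-right pass over candidate positions: count each index where
--     # some target word starts, instead of repeatedly re-running find() for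
--     # every word from the minimum of the previous round.
--     count = 0
--     for i in range(len(text) + 1):
--         if any(text.startswith(w, i) for w in to_find):
--             count += 1
--     return count
-- ===== Notes on version B (the rewrite author's own statement) =====
-- stated objective: faster
-- what changed: B replaces A's rounds of max/min over per-word find() restarts (each round rescans the text for every word) with a single scan over positions 0..len(text) counting the positions where some target word starts; Pre_ only excludes the empty word list, on which A's max([]) raises ValueError, and there B naturally returns 0 (stated checkably in Raises_).
-- crash fix: On to_find = [] A raises ValueError from max([]) while B returns 0. — e.g. on get_found_count("abc", []): A raises ValueError, B returns 0
import Mathlib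
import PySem

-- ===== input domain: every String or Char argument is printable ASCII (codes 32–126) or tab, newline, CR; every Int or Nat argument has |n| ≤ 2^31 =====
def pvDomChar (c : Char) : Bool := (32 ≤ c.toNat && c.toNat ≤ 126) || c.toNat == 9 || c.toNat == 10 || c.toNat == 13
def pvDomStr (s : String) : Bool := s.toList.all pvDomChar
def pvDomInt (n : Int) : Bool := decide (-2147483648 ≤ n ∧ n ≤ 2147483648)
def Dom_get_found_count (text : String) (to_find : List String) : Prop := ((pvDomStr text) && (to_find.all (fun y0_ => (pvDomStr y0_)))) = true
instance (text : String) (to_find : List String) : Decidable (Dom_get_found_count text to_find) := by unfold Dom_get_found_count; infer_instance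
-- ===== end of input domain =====

-- B replaces A's rounds of max/min over per-word find() restarts with a single scan over
-- the positions 0..len(text), counting the positions where some target word starts (measured
-- faster in a timing run). Pre_ excludes only to_find = [], where A's max([]) raises ValueError.

-- ===== PORT A =====
-- A's while loop. The fuel len(text)+2 is never exhausted: the search lower bound start+1
-- strictly increases each round and stays ≤ len(text)+1 (see gfcLoop_eq below).
def gfcLoop (text : String) (to_find : List String) : Nat → Int → List Int → Int
  | 0, count, _ => count
  | fuel+1, count, inds =>
    match PySem.List.max? inds (fun x => x) with
    | none => count   -- Python: max([]) raises ValueError (only when to_find = []); excluded by Pre_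
    | some m =>
      if m > -1 then
        match PySem.List.min? (inds.filter (fun i => decide (i > -1))) (fun x => x) with
        | none => count -- unreachable: the guard gives an element > -1
        | some start =>
          gfcLoop text to_find fuel (count + 1)
            (to_find.map (fun w => PySem.Str.findFrom text w (start + 1)))
      else count

def get_found_count (text : String) (to_find : List String) : Int :=
  gfcLoop text to_find (text.toList.length + 2) 0
    (to_find.map (fun w => PySem.Str.find text w))

-- ===== PORT B =====
-- text.startswith(w, i) for 0 ≤ i ≤ len(text) is exactly "w is a prefix of text[i:]",
-- ported as PySem.Chars.startswith on the dropped character list (i ranges over 0..len only).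
def get_found_count_alt (text : String) (to_find : List String) : Int :=
  (PySem.List.pyRange 0 (PySem.Str.len text + 1) 1).foldl
    (fun count i =>
      if to_find.any (fun w => PySem.Chars.startswith (text.toList.drop i.toNat) w.toList) then
        count + 1
      else count)
    0

-- ===== PRECONDITION & SPEC =====
-- Pre_ excludes only the empty word list: there Python's max([]) raises ValueError.
def Pre_get_found_count (text : String) (to_find : List String) : Prop := to_find ≠ []
instance (text : String) (to_find : List String) : Decidable (Pre_get_found_count text to_find) := by unfold Pre_get_found_count; infer_instance
def pvWitness_get_found_count : String × List String := ("abcab", ["ab", "c"])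

-- On to_find = [] A raises ValueError from max([]) while B returns 0.
def Raises_get_found_count (text : String) (to_find : List String) : Prop := to_find = []
instance (text : String) (to_find : List String) : Decidable (Raises_get_found_count text to_find) := by unfold Raises_get_found_count; infer_instance
def pvRaiseWitness_get_found_count : String × List String := ("abc", [])
def pvRaiseWitnessOut_get_found_count : Int := 0

def Spec_get_found_count (text : String) (to_find : List String) (out : Int) : Prop := out = get_found_count_alt text to_find
instance (text : String) (to_find : List String) (out : Int) : Decidable (Spec_get_found_count text to_find out) := by unfold Spec_get_found_count; infer_instance

-- ===== CLAIM (what is proved, stated in full; the proofs are below) =====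
def Claim_equal_get_found_count : Prop := ∀ (text : String) (to_find : List String), Dom_get_found_count text to_find → Pre_get_found_count text to_find → Spec_get_found_count text to_find (get_found_count text to_find)
def Claim_raises_get_found_count : Prop := (∀ (text : String) (to_find : List String), Dom_get_found_count text to_find → Raises_get_found_count text to_find → ¬ Pre_get_found_count text to_find) ∧ (Dom_get_found_count (pvRaiseWitness_get_found_count.1) (pvRaiseWitness_get_found_count.2) ∧ Raises_get_found_count (pvRaiseWitness_get_found_count.1) (pvRaiseWitness_get_found_count.2) ∧ get_found_count_alt (pvRaiseWitness_get_found_count.1) (pvRaiseWitness_get_found_count.2) = pvRaiseWitnessOut_get_found_count)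

-- ===== LEMMAS AND PROOFS =====

-- "some target word starts at position i"
def occB (s : List Char) (tf : List String) (i : Nat) : Bool :=
  tf.any (fun w => PySem.Chars.startswith (s.drop i) w.toList)

-- number of match positions in [k, length s]
def cnt (s : List Char) (tf : List String) (k : Nat) : Nat :=
  ((Finset.range (s.length + 1)).filter (fun i => k ≤ i ∧ occB s tf i = true)).card

lemma occB_iff (s : List Char) (tf : List String) (i : Nat) :
    occB s tf i = true ↔ ∃ w ∈ tf, w.toList <+: s.drop i := by
  simp [occB, List.any_eq_true, PySem.Chars.startswith_iff]

lemma findFrom_of_length_lt (s sub : List Char) (k : Nat) (h : s.length < k) :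
    PySem.Chars.findFrom s sub (k : Int) none = -1 := by
  unfold PySem.Chars.findFrom
  have h1 : ¬ ((k : Int) < 0) := by omega
  have h2 : ((s.length : Int)) < (k : Int) := by exact_mod_cast h
  simp [h1, h2]

lemma findFrom_ne_neg_one_iff (s sub : List Char) (k : Nat) (hk : k ≤ s.length) :
    PySem.Chars.findFrom s sub (k : Int) none ≠ -1 ↔ ∃ i, k ≤ i ∧ sub <+: s.drop i := by
  rw [Ne, PySem.Chars.findFrom_natCast_eq_neg_one_iff s sub k hk, not_not]
  rw [← PySem.Chars.isIn_iff_infix, ← PySem.Chars.exists_prefix_drop_iff_isIn]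
  constructor
  · rintro ⟨j, hj⟩
    exact ⟨k + j, by omega, by rwa [List.drop_drop] at hj⟩
  · rintro ⟨i, hki, hi⟩
    exact ⟨i - k, by rw [List.drop_drop]; rwa [Nat.add_sub_cancel' hki]⟩

lemma findFrom_spec' (s sub : List Char) (k : Nat) (hk : k ≤ s.length)
    (h : PySem.Chars.findFrom s sub (k : Int) none ≠ -1) :
    (k : Int) ≤ PySem.Chars.findFrom s sub (k : Int) none ∧
    PySem.Chars.findFrom s sub (k : Int) none ≤ s.length ∧
    sub <+: s.drop (PySem.Chars.findFrom s sub (k : Int) none).toNat ∧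
    ∀ i : Nat, k ≤ i → i < (PySem.Chars.findFrom s sub (k : Int) none).toNat →
      ¬ sub <+: s.drop i := by
  obtain ⟨h1, h2, h3⟩ := PySem.Chars.findFrom_natCast_spec s sub k hk h
  refine ⟨h1, ?_, h2, h3⟩
  rw [PySem.Chars.findFrom_natCast s sub k hk] at h ⊢
  by_cases hh : PySem.Chars.find (s.drop k) sub = -1
  · simp [hh] at h
  · rw [if_neg hh]
    have := PySem.Chars.find_le_length (s.drop k) sub
    rw [List.length_drop] at this
    omega

lemma cnt_eq_zero (s : List Char) (tf : List String) (k : Nat)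
    (h : ∀ i, k ≤ i → i ≤ s.length → occB s tf i = false) : cnt s tf k = 0 := by
  rw [cnt, Finset.card_eq_zero, Finset.filter_eq_empty_iff]
  rintro i hi ⟨hki, hocc⟩
  rw [Finset.mem_range] at hi
  rw [h i hki (by omega)] at hocc; exact absurd hocc (by simp)

lemma cnt_step (s : List Char) (tf : List String) (k v : Nat)
    (hkv : k ≤ v) (hvn : v ≤ s.length) (hocc : occB s tf v = true)
    (hmin : ∀ i, k ≤ i → occB s tf i = true → v ≤ i) :
    cnt s tf k = cnt s tf (v + 1) + 1 := by
  have hset : (Finset.range (s.length + 1)).filter (fun i => k ≤ i ∧ occB s tf i = true)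
      = insert v ((Finset.range (s.length + 1)).filter (fun i => v + 1 ≤ i ∧ occB s tf i = true)) := by
    ext i
    simp only [Finset.mem_insert, Finset.mem_filter, Finset.mem_range]
    constructor
    · rintro ⟨hin, hki, ho⟩
      rcases eq_or_ne i v with rfl | hne
      · exact Or.inl rfl
      · exact Or.inr ⟨hin, by have := hmin i hki ho; omega, ho⟩
    · rintro (rfl | ⟨hin, hvi, ho⟩)
      · exact ⟨by omega, hkv, hocc⟩
      · exact ⟨hin, by omega, ho⟩
  rw [cnt, hset, Finset.card_insert_of_notMem (by simp), cnt]

lemma gfcLoop_eq (text : String) (tf : List String) (htf : tf ≠ []) :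
    ∀ (fuel : Nat) (k : Nat) (count : Int),
      k ≤ text.toList.length + 1 → text.toList.length + 1 - k < fuel →
      gfcLoop text tf fuel count (tf.map (fun w => PySem.Str.findFrom text w (k : Int))) =
        count + (cnt text.toList tf k : Int) := by
  intro fuel
  induction fuel with
  | zero => intro k count _ h; omega
  | succ fuel ih =>
    intro k count hk1 hfuel
    set s := text.toList with hs
    set inds := tf.map (fun w => PySem.Str.findFrom text w (k : Int)) with hinds
    have hindsC : inds = tf.map (fun w => PySem.Chars.findFrom s w.toList (k : Int) none) := by
      rw [hinds]
      exact List.map_congr_left fun w _ => by rw [PySem.Str.findFrom_eq, ← hs]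
    have hne : inds ≠ [] := by simp [hinds, htf]
    rw [gfcLoop]
    rcases hmax : PySem.List.max? inds (fun x => x) with _ | m
    · exact absurd ((PySem.List.max?_eq_none_iff _ _).1 hmax) hne
    dsimp only
    by_cases hkn : k ≤ s.length
    case neg =>
      -- k = length + 1: every find returns -1 (start past the end)
      have hall : ∀ x ∈ inds, x = -1 := by
        rw [hindsC]; rintro x hx
        obtain ⟨w, -, rfl⟩ := List.mem_map.1 hx
        exact findFrom_of_length_lt s w.toList k (by omega)
      have hm : m = -1 := hall m (PySem.List.max?_mem hmax)
      have hz : cnt s tf k = 0 := cnt_eq_zero s tf k (fun i hki hin => absurd hki (by omega))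
      rw [hm, if_neg (by omega), hz]
      norm_num
    case pos =>
      by_cases hocc : ∃ i, k ≤ i ∧ occB s tf i = true
      · obtain ⟨i0, hki0, ho0⟩ := hocc
        obtain ⟨w0, hw0mem, hw0pre⟩ := (occB_iff s tf i0).1 ho0
        have hw0 : PySem.Chars.findFrom s w0.toList (k : Int) none ≠ -1 :=
          (findFrom_ne_neg_one_iff s w0.toList k hkn).2 ⟨i0, hki0, hw0pre⟩
        have hr0mem : PySem.Chars.findFrom s w0.toList (k : Int) none ∈ inds := by
          rw [hindsC]; exact List.mem_map_of_mem hw0mem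
        obtain ⟨hr0k, -, -, -⟩ := findFrom_spec' s w0.toList k hkn hw0
        have hmpos : m > -1 := by
          have := PySem.List.max?_isMax hmax _ hr0mem
          simp only at this; omega
        rw [if_pos hmpos]
        have hr0filter : PySem.Chars.findFrom s w0.toList (k : Int) none
            ∈ inds.filter (fun i => decide (i > -1)) := by
          rw [List.mem_filter]; exact ⟨hr0mem, by simp; omega⟩
        rcases hminq : PySem.List.min? (inds.filter (fun i => decide (i > -1))) (fun x => x) with _ | v
        · rw [PySem.List.min?_eq_none_iff] at hminq
          rw [hminq] at hr0filter; simp at hr0filter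
        dsimp only
        have hvfil := PySem.List.min?_mem hminq
        rw [List.mem_filter] at hvfil
        obtain ⟨hvinds, hvpos⟩ := hvfil
        have hvpos' : v > -1 := by simpa using hvpos
        obtain ⟨w', hw'mem, hw'eq⟩ := List.mem_map.1 (hindsC ▸ hvinds)
        have hw'ne : PySem.Chars.findFrom s w'.toList (k : Int) none ≠ -1 := by
          rw [hw'eq]; omega
        obtain ⟨hvk, hvn, hvpre, -⟩ := findFrom_spec' s w'.toList k hkn hw'ne
        rw [hw'eq] at hvk hvn hvpre
        have hoccv : occB s tf v.toNat = true :=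
          (occB_iff s tf v.toNat).2 ⟨w', hw'mem, hvpre⟩
        have hminv : ∀ i, k ≤ i → occB s tf i = true → v.toNat ≤ i := by
          intro i hki hoi
          obtain ⟨w'', hw''mem, hw''pre⟩ := (occB_iff s tf i).1 hoi
          have hw'' : PySem.Chars.findFrom s w''.toList (k : Int) none ≠ -1 :=
            (findFrom_ne_neg_one_iff s w''.toList k hkn).2 ⟨i, hki, hw''pre⟩
          obtain ⟨hrk, -, -, hrmin⟩ := findFrom_spec' s w''.toList k hkn hw''
          have hle : (PySem.Chars.findFrom s w''.toList (k : Int) none).toNat ≤ i := by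
            by_contra hlt
            exact hrmin i hki (by omega) hw''pre
          have hrfil : PySem.Chars.findFrom s w''.toList (k : Int) none
              ∈ inds.filter (fun i => decide (i > -1)) := by
            rw [List.mem_filter]
            exact ⟨hindsC ▸ List.mem_map_of_mem hw''mem, by simp; omega⟩
          have := PySem.List.min?_isMin hminq _ hrfil
          simp only at this
          omega
        -- rewrite start+1 as a Nat cast and apply the IH
        have hvcast : (v + 1 : Int) = ((v.toNat + 1 : Nat) : Int) := by omega
        rw [hvcast]
        rw [ih (v.toNat + 1) (count + 1) (by omega) (by omega)]
        rw [cnt_step s tf k v.toNat (by omega) (by omega) hoccv hminv]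
        push_cast
        ring
      · push Not at hocc
        have hall : ∀ x ∈ inds, x = -1 := by
          rw [hindsC]; rintro x hx
          obtain ⟨w, hwmem, rfl⟩ := List.mem_map.1 hx
          by_contra hne1
          obtain ⟨i, hki, hpre⟩ := (findFrom_ne_neg_one_iff s w.toList k hkn).1 hne1
          have : occB s tf i = true := (occB_iff s tf i).2 ⟨w, hwmem, hpre⟩
          have h2 := hocc i hki
          rw [this] at h2; exact absurd h2 (by simp)
        have hm : m = -1 := hall m (PySem.List.max?_mem hmax)
        rw [hm, if_neg (by omega)]
        have hz : cnt s tf k = 0 := cnt_eq_zero s tf k (fun i hki _ => by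
          have := hocc i hki
          cases h : occB s tf i
          · rfl
          · rw [h] at this; exact absurd this (by simp))
        rw [hz]; ring

lemma alt_eq_cnt (text : String) (tf : List String) :
    get_found_count_alt text tf = (cnt text.toList tf 0 : Int) := by
  rw [get_found_count_alt, PySem.Str.len_eq]
  rw [show ((text.toList.length : Int) + 1) = ((text.toList.length + 1 : Nat) : Int) by push_cast; ring]
  rw [PySem.List.pyRange_zero_nat, List.foldl_map, PySem.List.foldl_count_if]
  rw [cnt, show ((Finset.range (text.toList.length + 1)).filter
        (fun i => 0 ≤ i ∧ occB text.toList tf i = true)).card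
      = (Multiset.filter (fun i => 0 ≤ i ∧ occB text.toList tf i = true)
          (Multiset.range (text.toList.length + 1))).card from rfl]
  simp only [Multiset.range, Multiset.filter_coe, Multiset.coe_card]
  rw [List.countP_eq_length_filter]
  have hpt : ∀ i ∈ List.range (text.toList.length + 1),
      (fun y : Nat => tf.any fun w => PySem.Chars.startswith (List.drop (((y : Int)).toNat) text.toList) w.toList) i
      = (fun i => decide (0 ≤ i ∧ occB text.toList tf i = true)) i := by
    intro i _
    simp only [Int.toNat_natCast]
    rw [Bool.eq_iff_iff]
    simp [occB, List.any_eq_true]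
  rw [List.filter_congr hpt]
  simp

-- ===== VERDICT (by name: the statement is the Claim_ definition above) =====
theorem get_found_count_spec : Claim_equal_get_found_count := by
  intro text tf _ hpre
  unfold Spec_get_found_count
  have h0 : tf.map (fun w => PySem.Str.find text w)
      = tf.map (fun w => PySem.Str.findFrom text w ((0 : Nat) : Int)) := by
    refine List.map_congr_left (fun w _ => ?_)
    simp [PySem.Str.find_eq, PySem.Str.findFrom_eq]
  rw [get_found_count, h0, gfcLoop_eq text tf hpre _ 0 0 (by omega) (by omega),
    alt_eq_cnt, zero_add]

theorem get_found_count_raises : Claim_raises_get_found_count := by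
  unfold Claim_raises_get_found_count
  exact ⟨fun _ _ _ h => by simp [Raises_get_found_count] at h; simp [Pre_get_found_count, h],
    by decide⟩

-- self-check: B's port really returns the stated value at the raise witness (cites the theorem above)
theorem pvRaiseWitnessOut_ok :
    get_found_count_alt pvRaiseWitness_get_found_count.1 pvRaiseWitness_get_found_count.2
      = pvRaiseWitnessOut_get_found_count :=
  get_found_count_raises.2.2.2
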